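-- pv_equiv track=rewrite | github.com/STEP-FWD/protocols | scripts/sequential_to_tabular.py | _parse_me_pr_iwtd_veo
-- ===== SOURCE A (Python) =====
-- from typing import List, Optional, Tuple
--
-- def _classify_h4_heading(line: str) -> Optional[str]:
--     normalized = line.strip().lower()
--     if "materials and equipment" in normalized and "(me)" in normalized:
--         return "me"
--     if "parameters and ranges" in normalized and "(pr)" in normalized:
--         return "pr"
--     if "issues, warnings, troubleshooting" in normalized and "(iwtd)" in normalized:
--         return "iwtd"
--     if "validation and expected outcomes" in normalized and "(veo)" in normalized:
--         return "veo"
--     return None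
--
-- def _collect_section_body(lines: List[str], start_index: int) -> Tuple[str, int]:
--     buffer: List[str] = []
--     index = start_index
--     total = len(lines)
--     while index < total:
--         raw = lines[index]
--         stripped = raw.strip()
--         if stripped == "---":
--             break
--         if raw.startswith("#### "):
--             break
--         if raw.startswith("### "):
--             break
--         if raw.startswith("## ") and not raw.startswith("###"):
--             break
--         buffer.append(raw.rstrip("\n"))
--         index += 1
--     return "\n".join(buffer).strip(), index
--
-- def _parse_me_pr_iwtd_veo(lines: List[str], start_index: int) -> Tuple[dict, int]:
--     fields = {"me": "", "pr": "", "iwtd": "", "veo": ""}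
--     index = start_index
--     total = len(lines)
--     while index < total:
--         raw = lines[index]
--         stripped = raw.strip()
--         if stripped == "---":
--             index += 1
--             continue
--         if raw.startswith("## ") and not raw.startswith("###"):
--             break
--         if raw.startswith("### "):
--             break
--         if raw.startswith("#### "):
--             key = _classify_h4_heading(raw)
--             if key:
--                 body, next_index = _collect_section_body(lines, index + 1)
--                 fields[key] = body
--                 index = next_index
--                 continue
--         index += 1
--     return fields, index
-- ===== SOURCE B (Python) =====
-- from typing import List, Optional, Tuple
--
-- def _classify_h4_heading(line: str) -> Optional[str]:
--     normalized = line.strip().lower()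
--     if "materials and equipment" in normalized and "(me)" in normalized:
--         return "me"
--     if "parameters and ranges" in normalized and "(pr)" in normalized:
--         return "pr"
--     if "issues, warnings, troubleshooting" in normalized and "(iwtd)" in normalized:
--         return "iwtd"
--     if "validation and expected outcomes" in normalized and "(veo)" in normalized:
--         return "veo"
--     return None
--
-- def _parse_me_pr_iwtd_veo(lines: List[str], start_index: int) -> Tuple[dict, int]:
--     # One flat pass: a `current` section key plus per-section line buffers,
--     # instead of A's nested outer/inner collection loops.
--     bufs = {"me": [], "pr": [], "iwtd": [], "veo": []}
--     current: Optional[str] = None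
--     index = start_index
--     total = len(lines)
--     while index < total:
--         raw = lines[index]
--         if raw.strip() == "---":
--             current = None
--         elif raw.startswith("## ") and not raw.startswith("###"):
--             break
--         elif raw.startswith("### "):
--             break
--         elif raw.startswith("#### "):
--             current = _classify_h4_heading(raw)
--             if current is not None:
--                 bufs[current] = []
--         elif current is not None:
--             bufs[current].append(raw.rstrip("\n"))
--         index += 1
--     fields = {k: "\n".join(v).strip() for k, v in bufs.items()}
--     return fields, index
-- ===== Notes on version B (the rewrite author's own statement) =====
-- stated objective: simpler
-- what changed: Replaced A's nested outer-dispatch loop plus per-section inner collection loop (with a helper function) by a single flat pass over the lines that keeps a `current` section key and per-section line buffers, joining each buffer once at the end.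
import Mathlib
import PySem

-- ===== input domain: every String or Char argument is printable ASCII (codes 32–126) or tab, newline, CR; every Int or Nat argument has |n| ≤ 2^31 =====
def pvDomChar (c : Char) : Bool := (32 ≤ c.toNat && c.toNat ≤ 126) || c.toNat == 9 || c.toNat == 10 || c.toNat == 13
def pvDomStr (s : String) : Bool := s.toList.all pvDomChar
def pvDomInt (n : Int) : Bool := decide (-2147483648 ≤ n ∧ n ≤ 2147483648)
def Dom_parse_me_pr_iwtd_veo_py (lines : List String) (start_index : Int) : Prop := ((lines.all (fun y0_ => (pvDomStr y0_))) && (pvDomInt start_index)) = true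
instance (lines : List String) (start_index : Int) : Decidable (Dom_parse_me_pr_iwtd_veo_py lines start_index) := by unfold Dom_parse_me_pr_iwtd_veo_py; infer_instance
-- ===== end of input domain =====

-- B replaces A's nested outer-dispatch/inner-collect loops with one flat pass keeping a
-- `current` section key and per-section line buffers (objective: simpler decomposition).

-- shared primitive: Python's raw.rstrip("\n") — exact: drops trailing '\n' characters only
def pyRstripNl (s : String) : String :=
  String.ofList ((s.toList.reverse.dropWhile (fun c => c == '\n')).reverse)

-- ===== PORT A =====
def classify_h4_heading (line : String) : Option String :=
  let normalized := PySem.Str.lower (PySem.Str.strip line)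
  if PySem.Str.isIn "materials and equipment" normalized && PySem.Str.isIn "(me)" normalized then some "me"
  else if PySem.Str.isIn "parameters and ranges" normalized && PySem.Str.isIn "(pr)" normalized then some "pr"
  else if PySem.Str.isIn "issues, warnings, troubleshooting" normalized && PySem.Str.isIn "(iwtd)" normalized then some "iwtd"
  else if PySem.Str.isIn "validation and expected outcomes" normalized && PySem.Str.isIn "(veo)" normalized then some "veo"
  else none

-- the while-loop of _collect_section_body (buffer, index are the loop state).
-- `fuel` is only a structural totality guard: it is called with fuel = (len - index).toNat,
-- which always dominates the remaining iteration count, so the 0-branch coincides with the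
-- loop's index ≥ len exit.  lines[index] is read with pyGetD "" — in range whenever Pre_
-- holds (Python raises outside Pre_).
def collectAux (lines : List String) (fuel : Nat) (buffer : List String) (index : Int) :
    List String × Int :=
  match fuel with
  | 0 => (buffer, index)
  | f + 1 =>
    if index < (lines.length : Int) then
      let raw := PySem.List.pyGetD lines index ""
      if PySem.Str.strip raw == "---" then (buffer, index)
      else if PySem.Str.startswith raw "#### " then (buffer, index)
      else if PySem.Str.startswith raw "### " then (buffer, index)
      else if PySem.Str.startswith raw "## " && !PySem.Str.startswith raw "###" then (buffer, index)
      else collectAux lines f (buffer ++ [pyRstripNl raw]) (index + 1)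
    else (buffer, index)

def collect_section_body (lines : List String) (start_index : Int) : String × Int :=
  let r := collectAux lines ((lines.length : Int) - start_index).toNat [] start_index
  (PySem.Str.strip (PySem.Str.join "\n" r.1), r.2)

-- the while-loop of _parse_me_pr_iwtd_veo (same fuel scheme; the loop's index never
-- decreases, so the fuel stays sufficient); Python's `key = _classify…; if key:` becomes
-- an isSome test (classify never returns the empty string)
def parseLoop (lines : List String) (fuel : Nat) (fields : PySem.Dict String String)
    (index : Int) : PySem.Dict String String × Int :=
  match fuel with
  | 0 => (fields, index)
  | f + 1 =>
    if index < (lines.length : Int) then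
      let raw := PySem.List.pyGetD lines index ""
      if PySem.Str.strip raw == "---" then parseLoop lines f fields (index + 1)
      else if PySem.Str.startswith raw "## " && !PySem.Str.startswith raw "###" then (fields, index)
      else if PySem.Str.startswith raw "### " then (fields, index)
      else if PySem.Str.startswith raw "#### " then
        let key? := classify_h4_heading raw
        if key?.isSome then
          let key := key?.getD ""
          let r := collect_section_body lines (index + 1)
          parseLoop lines f (fields.insert key r.1) r.2
        else parseLoop lines f fields (index + 1)
      else parseLoop lines f fields (index + 1)
    else (fields, index)

def parse_me_pr_iwtd_veo_py (lines : List String) (start_index : Int) : (List (String × String)) × Int :=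
  let fields : PySem.Dict String String :=
    PySem.Dict.ofList [("me", ""), ("pr", ""), ("iwtd", ""), ("veo", "")]
  let r := parseLoop lines ((lines.length : Int) - start_index).toNat fields start_index
  (r.1.items, r.2)

-- ===== PORT B =====
def classify_h4_heading_alt (line : String) : Option String :=
  let normalized := PySem.Str.lower (PySem.Str.strip line)
  if PySem.Str.isIn "materials and equipment" normalized && PySem.Str.isIn "(me)" normalized then some "me"
  else if PySem.Str.isIn "parameters and ranges" normalized && PySem.Str.isIn "(pr)" normalized then some "pr"
  else if PySem.Str.isIn "issues, warnings, troubleshooting" normalized && PySem.Str.isIn "(iwtd)" normalized then some "iwtd"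
  else if PySem.Str.isIn "validation and expected outcomes" normalized && PySem.Str.isIn "(veo)" normalized then some "veo"
  else none

-- B's single flat while-loop (same fuel totality guard as above);
-- `bufs[current].append(x)` is ported as overwriting the entry with the appended list
-- (the key is always present when current is set), and `current = _classify…;
-- if current is not None:` as an isSome test
def flatLoop (lines : List String) (fuel : Nat) (bufs : PySem.Dict String (List String))
    (current : Option String) (index : Int) : PySem.Dict String (List String) × Int :=
  match fuel with
  | 0 => (bufs, index)
  | f + 1 =>
    if index < (lines.length : Int) then
      let raw := PySem.List.pyGetD lines index ""
      if PySem.Str.strip raw == "---" then flatLoop lines f bufs none (index + 1)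
      else if PySem.Str.startswith raw "## " && !PySem.Str.startswith raw "###" then (bufs, index)
      else if PySem.Str.startswith raw "### " then (bufs, index)
      else if PySem.Str.startswith raw "#### " then
        let current' := classify_h4_heading_alt raw
        if current'.isSome then
          flatLoop lines f (bufs.insert (current'.getD "") []) current' (index + 1)
        else
          flatLoop lines f bufs current' (index + 1)
      else
        match current with
        | some key =>
            flatLoop lines f (bufs.insert key (bufs.getD key [] ++ [pyRstripNl raw])) (some key) (index + 1)
        | none => flatLoop lines f bufs none (index + 1)
    else (bufs, index)

def parse_me_pr_iwtd_veo_py_alt (lines : List String) (start_index : Int) : (List (String × String)) × Int :=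
  let bufs : PySem.Dict String (List String) :=
    PySem.Dict.ofList [("me", []), ("pr", []), ("iwtd", []), ("veo", [])]
  let r := flatLoop lines ((lines.length : Int) - start_index).toNat bufs none start_index
  (r.1.items.map (fun kv => (kv.1, PySem.Str.strip (PySem.Str.join "\n" kv.2))), r.2)

-- ===== PRECONDITION & SPEC =====
-- Pre_ excludes exactly the inputs where the Python raises IndexError (reading
-- lines[start_index] with start_index < -len(lines)); B's Python raises there too.
def Pre_parse_me_pr_iwtd_veo_py (lines : List String) (start_index : Int) : Prop :=
  -(lines.length : Int) ≤ start_index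
instance (lines : List String) (start_index : Int) : Decidable (Pre_parse_me_pr_iwtd_veo_py lines start_index) := by unfold Pre_parse_me_pr_iwtd_veo_py; infer_instance

def pvWitness_parse_me_pr_iwtd_veo_py : List String × Int :=
  (["#### Materials and Equipment (ME)", "step one", "---"], 0)

def Spec_parse_me_pr_iwtd_veo_py (lines : List String) (start_index : Int) (out : (List (String × String)) × Int) : Prop := out = parse_me_pr_iwtd_veo_py_alt lines start_index
instance (lines : List String) (start_index : Int) (out : (List (String × String)) × Int) : Decidable (Spec_parse_me_pr_iwtd_veo_py lines start_index out) := by unfold Spec_parse_me_pr_iwtd_veo_py; infer_instance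

-- ===== CLAIM (what is proved, stated in full; the proofs are below) =====
def Claim_equal_parse_me_pr_iwtd_veo_py : Prop := ∀ (lines : List String) (start_index : Int), Dom_parse_me_pr_iwtd_veo_py lines start_index → Pre_parse_me_pr_iwtd_veo_py lines start_index → Spec_parse_me_pr_iwtd_veo_py lines start_index (parse_me_pr_iwtd_veo_py lines start_index)

-- ===== LEMMAS AND PROOFS =====

theorem pvWitness_ok :
    Dom_parse_me_pr_iwtd_veo_py pvWitness_parse_me_pr_iwtd_veo_py.1 pvWitness_parse_me_pr_iwtd_veo_py.2 ∧
    Pre_parse_me_pr_iwtd_veo_py pvWitness_parse_me_pr_iwtd_veo_py.1 pvWitness_parse_me_pr_iwtd_veo_py.2 := by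
  constructor <;> decide

-- join-and-strip of a line buffer, and mapping it over a whole buffer dict
def fin (l : List String) : String := PySem.Str.strip (PySem.Str.join "\n" l)

def finDict (d : PySem.Dict String (List String)) : PySem.Dict String String :=
  PySem.Dict.mk (d.items.map (fun kv => (kv.1, fin kv.2)))

theorem contains_finDict (d : PySem.Dict String (List String)) (k : String) :
    (finDict d).contains k = d.contains k := by
  simp only [finDict, PySem.Dict.contains, List.any_map]
  rfl

theorem finDict_insert (d : PySem.Dict String (List String)) (k : String) (v : List String) :
    finDict (d.insert k v) = (finDict d).insert k (fin v) := by
  by_cases hc : d.contains k = true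
  · apply PySem.Dict.ext
    have hc' : (finDict d).contains k = true := by rw [contains_finDict]; exact hc
    show ((d.insert k v).items.map (fun kv => (kv.1, fin kv.2))) = _
    rw [PySem.Dict.items_insert_of_contains _ _ hc, PySem.Dict.items_insert_of_contains _ _ hc']
    show _ = ((d.items.map (fun kv => (kv.1, fin kv.2))).map _)
    rw [List.map_map, List.map_map]
    apply List.map_congr_left
    intro p _
    by_cases hp : (p.1 == k) = true <;> simp [hp, Function.comp]
  · apply PySem.Dict.ext
    have hc2 : d.contains k = false := by simpa using hc
    have hc' : (finDict d).contains k = false := by rw [contains_finDict]; exact hc2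
    show ((d.insert k v).items.map (fun kv => (kv.1, fin kv.2))) = _
    rw [PySem.Dict.items_insert_of_not_contains _ _ hc2, PySem.Dict.items_insert_of_not_contains _ _ hc']
    simp [finDict]

theorem insert_getD_self {ν : Type} (d : PySem.Dict String ν) (k : String) (dflt : ν)
    (hnd : d.keys.Nodup) (hc : d.contains k = true) :
    d.insert k (d.getD k dflt) = d := by
  apply PySem.Dict.ext
  rw [PySem.Dict.items_insert_of_contains _ _ hc]
  have : ∀ p ∈ d.items, (if (p.1 == k) = true then (k, d.getD k dflt) else p) = p := by
    intro p hp
    by_cases hpk : (p.1 == k) = true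
    · have hk : p.1 = k := by simpa using hpk
      have hmem : (k, p.2) ∈ d.items := by rw [← hk]; exact hp
      have := PySem.Dict.getD_of_mem_items d hmem hnd dflt
      rw [if_pos hpk, this, ← hk]
    · simp [hpk]
  rw [List.map_congr_left this]
  exact List.map_id' _

theorem finDict_collapse (d : PySem.Dict String (List String)) (k : String)
    (hnd : d.keys.Nodup) (hc : d.contains k = true) :
    (finDict d).insert k (fin (d.getD k [])) = finDict d := by
  rw [← finDict_insert, insert_getD_self d k [] hnd hc]

-- startswith exclusivity facts for the heading markers
theorem sw_mono (raw p q : String) (h : p.toList <+: q.toList)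
    (hq : PySem.Str.startswith raw q = true) : PySem.Str.startswith raw p = true := by
  rw [PySem.Str.startswith_eq, PySem.Chars.startswith_iff] at *
  exact h.trans hq

theorem sw4_not_sw3 (raw : String) (h : PySem.Str.startswith raw "#### " = true) :
    PySem.Str.startswith raw "### " = false := by
  cases h3 : PySem.Str.startswith raw "### " with
  | false => rfl
  | true =>
    rw [PySem.Str.startswith_eq, PySem.Chars.startswith_iff] at h h3
    have := List.prefix_of_prefix_length_le h3 h (by decide)
    exact absurd this (by decide)

theorem sw4_sw (raw : String) (h : PySem.Str.startswith raw "#### " = true) :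
    PySem.Str.startswith raw "###" = true := sw_mono raw "###" "#### " (by decide) h

theorem sw3_sw (raw : String) (h : PySem.Str.startswith raw "### " = true) :
    PySem.Str.startswith raw "###" = true := sw_mono raw "###" "### " (by decide) h

-- once the index has passed the end, any fuel returns the loop state unchanged
theorem collectAux_stop (lines : List String) (buffer : List String) (index : Int)
    (hge : ¬ index < (lines.length : Int)) (f : Nat) :
    collectAux lines f buffer index = (buffer, index) := by
  cases f <;> simp [collectAux, hge]

theorem parseLoop_stop (lines : List String) (fields : PySem.Dict String String) (index : Int)
    (hge : ¬ index < (lines.length : Int)) (f : Nat) :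
    parseLoop lines f fields index = (fields, index) := by
  cases f <;> simp [parseLoop, hge]

theorem flatLoop_stop (lines : List String) (bufs : PySem.Dict String (List String))
    (current : Option String) (index : Int)
    (hge : ¬ index < (lines.length : Int)) (f : Nat) :
    flatLoop lines f bufs current index = (bufs, index) := by
  cases f <;> simp [flatLoop, hge]

-- the joint simulation: A's outer loop vs B's flat loop, for ANY sufficient fuels
-- (first conjunct: no active section; second conjunct: A mid-collect in section `key`
-- whose buffer B holds in bufs[key])
theorem main_sim (n : Nat) : ∀ (lines : List String) (index : Int) (bufs : PySem.Dict String (List String)),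
    ((lines.length : Int) - index).toNat ≤ n → bufs.keys.Nodup →
    ((∀ fa fb : Nat, ((lines.length : Int) - index).toNat ≤ fa →
        ((lines.length : Int) - index).toNat ≤ fb →
      parseLoop lines fa (finDict bufs) index =
        (finDict (flatLoop lines fb bufs none index).1, (flatLoop lines fb bufs none index).2))
     ∧ ∀ key, bufs.contains key = true → ∀ fa fc fb : Nat,
        ((lines.length : Int) - index).toNat ≤ fa →
        ((lines.length : Int) - index).toNat ≤ fc →
        ((lines.length : Int) - index).toNat ≤ fb →
        parseLoop lines fa
            ((finDict bufs).insert key (fin (collectAux lines fc (bufs.getD key []) index).1))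
            (collectAux lines fc (bufs.getD key []) index).2 =
          (finDict (flatLoop lines fb bufs (some key) index).1,
           (flatLoop lines fb bufs (some key) index).2)) := by
  induction n with
  | zero =>
    intro lines index bufs hm hnd
    have hge : ¬ index < (lines.length : Int) := by omega
    constructor
    · intro fa fb _ _
      rw [parseLoop_stop _ _ _ hge, flatLoop_stop _ _ _ _ hge]
    · intro key hc fa fc fb _ _ _
      rw [collectAux_stop _ _ _ hge, flatLoop_stop _ _ _ _ hge]
      rw [parseLoop_stop _ _ _ hge]
      rw [finDict_collapse bufs key hnd hc]
  | succ n ih =>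
    intro lines index bufs hm hnd
    by_cases hlt : index < (lines.length : Int)
    case neg =>
      constructor
      · intro fa fb _ _
        rw [parseLoop_stop _ _ _ hlt, flatLoop_stop _ _ _ _ hlt]
      · intro key hc fa fc fb _ _ _
        rw [collectAux_stop _ _ _ hlt, flatLoop_stop _ _ _ _ hlt]
        rw [parseLoop_stop _ _ _ hlt]
        rw [finDict_collapse bufs key hnd hc]
    case pos =>
    have hm' : ((lines.length : Int) - (index + 1)).toNat ≤ n := by omega
    have hpos : 1 ≤ ((lines.length : Int) - index).toNat := by omega
    constructor
    · -- L1
      intro fa fb hfa hfb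
      obtain ⟨fa, rfl⟩ : ∃ k, fa = k + 1 := ⟨fa - 1, by omega⟩
      obtain ⟨fb, rfl⟩ : ∃ k, fb = k + 1 := ⟨fb - 1, by omega⟩
      have hfa' : ((lines.length : Int) - (index + 1)).toNat ≤ fa := by omega
      have hfb' : ((lines.length : Int) - (index + 1)).toNat ≤ fb := by omega
      simp only [parseLoop, flatLoop, if_pos hlt]
      by_cases b1 : (PySem.Str.strip (PySem.List.pyGetD lines index "") == "---") = true
      · rw [if_pos b1, if_pos b1]
        exact (ih lines (index + 1) bufs hm' hnd).1 fa fb hfa' hfb'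
      · rw [if_neg b1, if_neg b1]
        by_cases b4 : (PySem.Str.startswith (PySem.List.pyGetD lines index "") "## " &&
            !PySem.Str.startswith (PySem.List.pyGetD lines index "") "###") = true
        · rw [if_pos b4, if_pos b4]
        · rw [if_neg b4, if_neg b4]
          by_cases b3 : (PySem.Str.startswith (PySem.List.pyGetD lines index "") "### ") = true
          · rw [if_pos b3, if_pos b3]
          · rw [if_neg b3, if_neg b3]
            by_cases b2 : (PySem.Str.startswith (PySem.List.pyGetD lines index "") "#### ") = true
            · rw [if_pos b2, if_pos b2]
              rw [show classify_h4_heading_alt (PySem.List.pyGetD lines index "") =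
                classify_h4_heading (PySem.List.pyGetD lines index "") from rfl]
              cases hcl : classify_h4_heading (PySem.List.pyGetD lines index "") with
              | none =>
                simp only [Option.isSome_none, Bool.false_eq_true, reduceIte]
                exact (ih lines (index + 1) bufs hm' hnd).1 fa fb hfa' hfb'
              | some k =>
                simp only [Option.isSome_some, if_pos, Option.getD_some]
                have IH2 := (ih lines (index + 1) (bufs.insert k []) hm'
                  (PySem.Dict.nodup_keys_insert bufs k [] hnd)).2 k
                  (PySem.Dict.contains_insert_self bufs k [])
                  fa (((lines.length : Int) - (index + 1)).toNat) fb hfa' le_rfl hfb'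
                rw [PySem.Dict.getD_insert_self, finDict_insert,
                  PySem.Dict.insert_insert_self] at IH2
                simp only [collect_section_body]
                simp only [fin] at IH2
                exact IH2
            · rw [if_neg b2, if_neg b2]
              exact (ih lines (index + 1) bufs hm' hnd).1 fa fb hfa' hfb'
    · -- L2
      intro key hc fa fc fb hfa hfc hfb
      obtain ⟨fa, rfl⟩ : ∃ k, fa = k + 1 := ⟨fa - 1, by omega⟩
      obtain ⟨fc, rfl⟩ : ∃ k, fc = k + 1 := ⟨fc - 1, by omega⟩
      obtain ⟨fb, rfl⟩ : ∃ k, fb = k + 1 := ⟨fb - 1, by omega⟩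
      have hfa' : ((lines.length : Int) - (index + 1)).toNat ≤ fa := by omega
      have hfc' : ((lines.length : Int) - (index + 1)).toNat ≤ fc := by omega
      have hfb' : ((lines.length : Int) - (index + 1)).toNat ≤ fb := by omega
      rw [show collectAux lines (fc + 1) (bufs.getD key []) index =
        (if index < (lines.length : Int) then
          (let raw := PySem.List.pyGetD lines index ""
           if PySem.Str.strip raw == "---" then (bufs.getD key [], index)
           else if PySem.Str.startswith raw "#### " then (bufs.getD key [], index)
           else if PySem.Str.startswith raw "### " then (bufs.getD key [], index)
           else if PySem.Str.startswith raw "## " && !PySem.Str.startswith raw "###" then (bufs.getD key [], index)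
           else collectAux lines fc (bufs.getD key [] ++ [pyRstripNl raw]) (index + 1))
         else (bufs.getD key [], index)) from rfl]
      rw [if_pos hlt]
      simp only [flatLoop, if_pos hlt]
      by_cases b1 : (PySem.Str.strip (PySem.List.pyGetD lines index "") == "---") = true
      · rw [if_pos b1, if_pos b1]
        rw [finDict_collapse bufs key hnd hc]
        simp only [parseLoop, if_pos hlt]
        rw [if_pos b1]
        exact (ih lines (index + 1) bufs hm' hnd).1 fa fb hfa' hfb'
      · rw [if_neg b1, if_neg b1]
        by_cases b2 : (PySem.Str.startswith (PySem.List.pyGetD lines index "") "#### ") = true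
        · rw [if_pos b2]
          rw [finDict_collapse bufs key hnd hc]
          have b3n : ¬ PySem.Str.startswith (PySem.List.pyGetD lines index "") "### " = true := by
            rw [sw4_not_sw3 _ b2]; exact Bool.false_ne_true
          have b4n : ¬ (PySem.Str.startswith (PySem.List.pyGetD lines index "") "## " &&
              !PySem.Str.startswith (PySem.List.pyGetD lines index "") "###") = true := by
            rw [sw4_sw _ b2]; simp
          simp only [parseLoop, if_pos hlt]
          rw [if_neg b1]
          rw [if_neg b4n, if_neg b4n]
          rw [if_neg b3n, if_neg b3n]
          rw [if_pos b2, if_pos b2]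
          rw [show classify_h4_heading_alt (PySem.List.pyGetD lines index "") =
            classify_h4_heading (PySem.List.pyGetD lines index "") from rfl]
          cases hcl : classify_h4_heading (PySem.List.pyGetD lines index "") with
          | none =>
            simp only [Option.isSome_none, Bool.false_eq_true, reduceIte]
            exact (ih lines (index + 1) bufs hm' hnd).1 fa fb hfa' hfb'
          | some k =>
            simp only [Option.isSome_some, if_pos, Option.getD_some]
            have IH2 := (ih lines (index + 1) (bufs.insert k []) hm'
              (PySem.Dict.nodup_keys_insert bufs k [] hnd)).2 k
              (PySem.Dict.contains_insert_self bufs k [])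
              fa (((lines.length : Int) - (index + 1)).toNat) fb hfa' le_rfl hfb'
            rw [PySem.Dict.getD_insert_self, finDict_insert,
              PySem.Dict.insert_insert_self] at IH2
            simp only [collect_section_body]
            simp only [fin] at IH2
            exact IH2
        · rw [if_neg b2]
          by_cases b3 : (PySem.Str.startswith (PySem.List.pyGetD lines index "") "### ") = true
          · rw [if_pos b3]
            rw [finDict_collapse bufs key hnd hc]
            have b4n : ¬ (PySem.Str.startswith (PySem.List.pyGetD lines index "") "## " &&
                !PySem.Str.startswith (PySem.List.pyGetD lines index "") "###") = true := by
              rw [sw3_sw _ b3]; simp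
            simp only [parseLoop, if_pos hlt]
            rw [if_neg b1]
            rw [if_neg b4n, if_neg b4n]
            rw [if_pos b3, if_pos b3]
          · rw [if_neg b3]
            by_cases b4 : (PySem.Str.startswith (PySem.List.pyGetD lines index "") "## " &&
                !PySem.Str.startswith (PySem.List.pyGetD lines index "") "###") = true
            · rw [if_pos b4]
              rw [finDict_collapse bufs key hnd hc]
              simp only [parseLoop, if_pos hlt]
              rw [if_neg b1]
              rw [if_pos b4, if_pos b4]
            · rw [if_neg b4]
              have IH2 := (ih lines (index + 1)
                (bufs.insert key (bufs.getD key [] ++ [pyRstripNl (PySem.List.pyGetD lines index "")])) hm'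
                (PySem.Dict.nodup_keys_insert _ _ _ hnd)).2 key
                (PySem.Dict.contains_insert_self _ _ _)
                (fa + 1) fc fb (by omega) hfc' hfb'
              rw [PySem.Dict.getD_insert_self, finDict_insert,
                PySem.Dict.insert_insert_self] at IH2
              rw [if_neg b4, if_neg b3, if_neg b2]
              exact IH2

-- ===== VERDICT (by name: the statement is the Claim_ definition above) =====
theorem parse_me_pr_iwtd_veo_py_spec : Claim_equal_parse_me_pr_iwtd_veo_py := by
  unfold Claim_equal_parse_me_pr_iwtd_veo_py
  intro lines start_index _ _
  unfold Spec_parse_me_pr_iwtd_veo_py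
  unfold parse_me_pr_iwtd_veo_py parse_me_pr_iwtd_veo_py_alt
  have h := (main_sim (((lines.length : Int) - start_index).toNat) lines start_index
    (PySem.Dict.ofList [("me", []), ("pr", []), ("iwtd", []), ("veo", [])]) le_rfl (by decide)).1
    (((lines.length : Int) - start_index).toNat) (((lines.length : Int) - start_index).toNat)
    le_rfl le_rfl
  rw [show (PySem.Dict.ofList [("me", ""), ("pr", ""), ("iwtd", ""), ("veo", "")] : PySem.Dict String String) =
    finDict (PySem.Dict.ofList [("me", []), ("pr", []), ("iwtd", []), ("veo", [])]) from by decide]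
  show (((parseLoop lines _ _ start_index).1).items, (parseLoop lines _ _ start_index).2) = _
  rw [h]
  simp only [finDict, fin]
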